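-- pv_equiv track=rewrite | github.com/Shaburofff/Fifth-lab | 5lab.py | filter_and_optimize
-- ===== SOURCE A (Python) =====
-- salary = {'A': 50, 'B': 55, 'C': 45, 'D': 60, 'E': 40, 'F': 65}
--
-- skill  = {'A': 80, 'B': 85, 'C': 75, 'D': 90, 'E': 70, 'F': 95}
--
-- budget = 220
--
-- def filter_and_optimize(assignments):
--     valid = []
--     for mids, juns in assignments:
--         total_sal = sum(salary[m] for m in mids) + sum(salary[j] for j in juns)
--         if total_sal <= budget:
--             valid.append((mids, juns, total_sal))
--     best = []
--     max_skill = -1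
--     for mids, juns, _ in valid:
--         total_sk = sum(skill[m] for m in mids) + sum(skill[j] for j in juns)
--         if total_sk > max_skill:
--             max_skill = total_sk
--             best = [(mids, juns)]
--         elif total_sk == max_skill:
--             best.append((mids, juns))
--     return best, max_skill
-- ===== SOURCE B (Python) =====
-- salary = {'A': 50, 'B': 55, 'C': 45, 'D': 60, 'E': 40, 'F': 65}
--
-- skill  = {'A': 80, 'B': 85, 'C': 75, 'D': 90, 'E': 70, 'F': 95}
--
-- budget = 220
--
-- def filter_and_optimize(assignments):
--     valid = [(mids, juns,
--               sum(skill[m] for m in mids) + sum(skill[j] for j in juns))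
--              for mids, juns in assignments
--              if sum(salary[m] for m in mids) + sum(salary[j] for j in juns) <= budget]
--     max_skill = max((sk for _, _, sk in valid), default=-1)
--     best = [(mids, juns) for mids, juns, sk in valid if sk == max_skill]
--     return best, max_skill
-- ===== Notes on version B (the rewrite author's own statement) =====
-- stated objective: simpler
-- what changed: Replaces A's running-max loop with tie-tracking and rebuilt best list by a compute-all / take-max(default=-1) / filter-equal decomposition over a single comprehension of affordable teams with their skill totals.
import Mathlib
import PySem

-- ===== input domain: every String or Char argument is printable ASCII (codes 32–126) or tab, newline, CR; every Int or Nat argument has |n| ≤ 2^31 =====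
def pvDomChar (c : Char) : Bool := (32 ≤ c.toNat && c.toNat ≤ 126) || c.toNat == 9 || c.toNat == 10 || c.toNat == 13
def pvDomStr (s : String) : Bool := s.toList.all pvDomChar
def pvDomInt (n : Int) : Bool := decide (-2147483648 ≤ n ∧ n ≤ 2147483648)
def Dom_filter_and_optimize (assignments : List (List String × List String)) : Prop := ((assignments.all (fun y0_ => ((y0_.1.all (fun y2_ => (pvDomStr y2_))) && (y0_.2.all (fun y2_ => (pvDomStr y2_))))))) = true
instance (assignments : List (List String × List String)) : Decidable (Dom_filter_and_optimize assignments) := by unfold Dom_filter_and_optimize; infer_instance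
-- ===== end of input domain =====

-- B replaces A's running-max loop with tie list by a compute-all / take-max(default=-1) / filter-equal decomposition (objective: simpler).

-- ===== PORT A =====
-- module-level dicts and the sums both versions of the Python compute
def pvSalary : PySem.Dict String Int :=
  PySem.Dict.ofList [("A", 50), ("B", 55), ("C", 45), ("D", 60), ("E", 40), ("F", 65)]
def pvSkill : PySem.Dict String Int :=
  PySem.Dict.ofList [("A", 80), ("B", 85), ("C", 75), ("D", 90), ("E", 70), ("F", 95)]
-- sum(salary[m] for m in mids) + sum(salary[j] for j in juns)  (getD is exact under Pre_: every member is a dict key)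
def pvSal (mids juns : List String) : Int :=
  (mids.map (fun m => pvSalary.getD m 0)).sum + (juns.map (fun j => pvSalary.getD j 0)).sum
def pvSk (mids juns : List String) : Int :=
  (mids.map (fun m => pvSkill.getD m 0)).sum + (juns.map (fun j => pvSkill.getD j 0)).sum

def filter_and_optimize (assignments : List (List String × List String)) : (List (List String × List String)) × Int :=
  let valid : List (List String × List String × Int) :=
    assignments.foldl (fun acc p =>
      if pvSal p.1 p.2 ≤ 220 then acc ++ [(p.1, p.2, pvSal p.1 p.2)] else acc) []
  valid.foldl (fun (st : (List (List String × List String)) × Int) t =>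
    if pvSk t.1 t.2.1 > st.2 then ([(t.1, t.2.1)], pvSk t.1 t.2.1)
    else if pvSk t.1 t.2.1 = st.2 then (st.1 ++ [(t.1, t.2.1)], st.2)
    else st) ([], -1)

-- ===== PORT B =====
def filter_and_optimize_alt (assignments : List (List String × List String)) : (List (List String × List String)) × Int :=
  let valid : List (List String × List String × Int) :=
    (assignments.filter (fun p => pvSal p.1 p.2 ≤ 220)).map (fun p => (p.1, p.2, pvSk p.1 p.2))
  let max_skill : Int := PySem.List.maxD (valid.map (fun t => t.2.2)) (fun y => y) (-1)
  let best : List (List String × List String) :=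
    (valid.filter (fun t => t.2.2 = max_skill)).map (fun t => (t.1, t.2.1))
  (best, max_skill)

-- ===== PRECONDITION & SPEC =====
-- Pre_ excludes exactly the inputs on which Python A raises KeyError: a team member that is not a key of the salary/skill dicts.
def Pre_filter_and_optimize (assignments : List (List String × List String)) : Prop :=
  ∀ p ∈ assignments, (∀ m ∈ p.1, m ∈ ["A", "B", "C", "D", "E", "F"]) ∧ (∀ j ∈ p.2, j ∈ ["A", "B", "C", "D", "E", "F"])
instance (assignments : List (List String × List String)) : Decidable (Pre_filter_and_optimize assignments) := by unfold Pre_filter_and_optimize; infer_instance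

def pvWitness_filter_and_optimize : (List (List String × List String)) := [(["A"], ["B"]), (["D", "F"], []), ([], [])]

def Spec_filter_and_optimize (assignments : List (List String × List String)) (out : (List (List String × List String)) × Int) : Prop := out = filter_and_optimize_alt assignments
instance (assignments : List (List String × List String)) (out : (List (List String × List String)) × Int) : Decidable (Spec_filter_and_optimize assignments out) := by unfold Spec_filter_and_optimize; infer_instance

-- ===== CLAIM (what is proved, stated in full; the proofs are below) =====
def Claim_equal_filter_and_optimize : Prop := ∀ (assignments : List (List String × List String)), Dom_filter_and_optimize assignments → Pre_filter_and_optimize assignments → Spec_filter_and_optimize assignments (filter_and_optimize assignments)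

-- ===== LEMMAS AND PROOFS =====

-- every skill value looked up (or defaulted) is nonnegative
lemma getD_skill_nonneg (m : String) : 0 ≤ pvSkill.getD m 0 := by
  rcases h : pvSkill.get? m with _ | v
  · simp [PySem.Dict.getD, h]
  · have hv : 0 ≤ v := by
      have hm : pvSkill = PySem.Dict.mk [("A", 80), ("B", 85), ("C", 75), ("D", 90), ("E", 70), ("F", 95)] := by decide
      rw [hm] at h
      simp only [PySem.Dict.get?_mk_cons] at h
      split_ifs at h <;> simp_all [PySem.Dict.get?] <;> omega
    simp [PySem.Dict.getD, h, hv]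

lemma pvSk_nonneg (mids juns : List String) : 0 ≤ pvSk mids juns := by
  unfold pvSk
  have h1 : (0:Int) ≤ (mids.map (fun m => pvSkill.getD m 0)).sum := by
    apply List.sum_nonneg; intro x hx
    rcases List.mem_map.mp hx with ⟨m, _, rfl⟩; exact getD_skill_nonneg m
  have h2 : (0:Int) ≤ (juns.map (fun j => pvSkill.getD j 0)).sum := by
    apply List.sum_nonneg; intro x hx
    rcases List.mem_map.mp hx with ⟨j, _, rfl⟩; exact getD_skill_nonneg j
  omega

-- max(l, default=-1) is the running max from -1 when all elements are nonnegative
lemma maxD_id_eq_foldl (l : List Int) (h : ∀ x ∈ l, (0:Int) ≤ x) :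
    PySem.List.maxD l (fun y => y) (-1) = l.foldl max (-1) := by
  cases l with
  | nil => rfl
  | cons x t =>
    rw [PySem.List.maxD, PySem.List.max?_id_cons, Option.getD_some, List.foldl_cons]
    have hx : max (-1) x = x := by
      have := h x (by simp); omega
    rw [hx]

-- A's second loop (running max with tie list) computes B's decomposition
lemma runmax_eq (F : List (List String × List String)) :
    F.foldl (fun (st : (List (List String × List String)) × Int) p =>
        if pvSk p.1 p.2 > st.2 then ([(p.1, p.2)], pvSk p.1 p.2)
        else if pvSk p.1 p.2 = st.2 then (st.1 ++ [(p.1, p.2)], st.2)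
        else st) ([], -1)
    = (F.filter (fun p => pvSk p.1 p.2 = (F.map (fun q => pvSk q.1 q.2)).foldl max (-1)),
       (F.map (fun q => pvSk q.1 q.2)).foldl max (-1)) := by
  induction F using List.reverseRecOn with
  | nil => rfl
  | append_singleton F p ih =>
    have hM : ((F ++ [p]).map (fun q => pvSk q.1 q.2)).foldl max (-1)
        = max ((F.map (fun q => pvSk q.1 q.2)).foldl max (-1)) (pvSk p.1 p.2) := by
      rw [List.map_append, List.foldl_append]; rfl
    have hle : ∀ q ∈ F, pvSk q.1 q.2 ≤ (F.map (fun q => pvSk q.1 q.2)).foldl max (-1) := by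
      intro q hq
      exact (PySem.List.le_foldl_max (F.map (fun q => pvSk q.1 q.2)) (-1)).2 _
        (List.mem_map.mpr ⟨q, hq, rfl⟩)
    rw [List.foldl_append, ih, List.foldl_cons, List.foldl_nil, hM]
    by_cases h1 : pvSk p.1 p.2 > (F.map (fun q => pvSk q.1 q.2)).foldl max (-1)
    · rw [if_pos h1]
      have hmx : max ((F.map (fun q => pvSk q.1 q.2)).foldl max (-1)) (pvSk p.1 p.2) = pvSk p.1 p.2 := by omega
      rw [hmx]
      have hnil : F.filter (fun q => pvSk q.1 q.2 = pvSk p.1 p.2) = [] := by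
        rw [List.filter_eq_nil_iff]
        intro q hq hc
        have := hle q hq
        simp only [decide_eq_true_eq] at hc
        omega
      simp [List.filter_append, hnil]
    · rw [if_neg h1]
      have hmx : max ((F.map (fun q => pvSk q.1 q.2)).foldl max (-1)) (pvSk p.1 p.2)
          = (F.map (fun q => pvSk q.1 q.2)).foldl max (-1) := by omega
      rw [hmx]
      by_cases h2 : pvSk p.1 p.2 = (F.map (fun q => pvSk q.1 q.2)).foldl max (-1)
      · rw [if_pos h2]
        simp [List.filter_append, h2]
      · rw [if_neg h2]
        simp [List.filter_append, h2]

-- ===== VERDICT (by name: the statement is the Claim_ definition above) =====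
theorem filter_and_optimize_spec : Claim_equal_filter_and_optimize := by
  intro assignments _ _
  unfold Spec_filter_and_optimize
  simp only [filter_and_optimize, filter_and_optimize_alt]
  have hvalid := PySem.List.foldl_append_ite
      (p := fun p : List String × List String => pvSal p.1 p.2 ≤ 220)
      (f := fun p : List String × List String => (p.1, p.2, pvSal p.1 p.2)) assignments []
  rw [List.nil_append] at hvalid
  rw [hvalid, List.foldl_map]
  have hnn : ∀ x ∈ ((assignments.filter (fun p => decide (pvSal p.1 p.2 ≤ 220))).map
      (fun p => (p.1, p.2, pvSk p.1 p.2))).map (fun t => t.2.2), (0:Int) ≤ x := by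
    intro x hx
    rcases List.mem_map.mp hx with ⟨t, _, rfl⟩
    rcases List.mem_map.mp ‹t ∈ _› with ⟨p, _, rfl⟩
    exact pvSk_nonneg p.1 p.2
  rw [maxD_id_eq_foldl _ hnn, List.map_map]
  rw [runmax_eq]
  rw [List.filter_map, List.map_map]
  simp [Function.comp_def]
  rfl
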